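-- pv_equiv track=rewrite | github.com/Chintapallidharmendra/ProjectF | question_script.py | extract_qna
-- ===== SOURCE A (Python) =====
-- def extract_qna(data, start_index):
--     """prepares lists of questions and answers in the given yml file"""
--     questions = []
--     answers = []
--     end_index = -1
--     for i in range(start_index, len(data)-1):
--         if "categories:" in data[i]:
--             end_index = i
--             break
--         if "- - " in data[i]:
--             questions.append(data[i])
--             answers.append(data[i+1])
--     return questions, answers, end_index
-- ===== SOURCE B (Python) =====
-- def extract_qna(data, start_index):
--     """prepares lists of questions and answers in the given yml file"""
--     n = len(data)
--     marker = next((i for i in range(start_index, n - 1)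
--                    if "categories:" in data[i]), None)
--     stop = n - 1 if marker is None else marker
--     questions = []
--     answers = []
--     for i in range(start_index, stop):
--         if "- - " in data[i]:
--             questions.append(data[i])
--             answers.append(data[i + 1])
--     return questions, answers, -1 if marker is None else marker
-- ===== Notes on version B (the rewrite author's own statement) =====
-- stated objective: alternative
-- what changed: Replaces A's single interleaved scan (which breaks on the 'categories:' marker while collecting pairs) by two sequential passes: first find the marker boundary, then collect the '- - ' question lines and their successor lines over the truncated range.
import Mathlib
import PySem

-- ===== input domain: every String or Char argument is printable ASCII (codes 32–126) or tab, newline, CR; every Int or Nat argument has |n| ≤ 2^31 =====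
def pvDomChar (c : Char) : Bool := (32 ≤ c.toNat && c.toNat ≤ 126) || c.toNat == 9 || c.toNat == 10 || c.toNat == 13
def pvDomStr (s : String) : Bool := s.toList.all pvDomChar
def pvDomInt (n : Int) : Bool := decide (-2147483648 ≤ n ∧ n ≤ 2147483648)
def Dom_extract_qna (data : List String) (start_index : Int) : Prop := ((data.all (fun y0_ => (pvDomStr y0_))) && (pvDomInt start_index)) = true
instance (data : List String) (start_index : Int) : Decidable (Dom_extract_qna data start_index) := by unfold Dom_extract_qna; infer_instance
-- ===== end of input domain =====

-- B separates boundary-finding from pair-collection into two sequential passes (alternative decomposition, same cost); equivalence is on return values (neither mutates).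

-- ===== PORT A =====
-- data[i] (possibly negative index); total form, exact under Pre_ (all scanned indices in range)
def pvLine (data : List String) (i : Int) : String := PySem.List.pyGetD data i ""

-- A's single interleaved loop: break on "categories:", else collect ("- - " line, successor line)
def pvLoopA (data : List String) : List Int → List String → List String → List String × List String × Int
  | [], qs, ans => (qs, ans, -1)
  | i :: rest, qs, ans =>
    if PySem.Str.isIn "categories:" (pvLine data i) then (qs, ans, i)
    else if PySem.Str.isIn "- - " (pvLine data i) then
      pvLoopA data rest (qs ++ [pvLine data i]) (ans ++ [pvLine data (i + 1)])
    else pvLoopA data rest qs ans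

def extract_qna (data : List String) (start_index : Int) : List String × List String × Int :=
  pvLoopA data (PySem.List.pyRange start_index ((data.length : Int) - 1) 1) [] []

-- ===== PORT B =====
-- pass 1: first index whose line contains "categories:" (none if no marker)
def pvFindMarkerB (data : List String) : List Int → Option Int
  | [] => none
  | i :: rest =>
    if PySem.Str.isIn "categories:" (pvLine data i) then some i else pvFindMarkerB data rest

-- pass 2: collect the "- - " lines and their successor lines over the truncated range
def pvCollectB (data : List String) : List Int → List String × List String → List String × List String
  | [], st => st
  | i :: rest, st =>
    if PySem.Str.isIn "- - " (pvLine data i) then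
      pvCollectB data rest (st.1 ++ [pvLine data i], st.2 ++ [pvLine data (i + 1)])
    else pvCollectB data rest st

def extract_qna_alt (data : List String) (start_index : Int) : List String × List String × Int :=
  let n : Int := data.length
  let marker := pvFindMarkerB data (PySem.List.pyRange start_index (n - 1) 1)
  let stop := match marker with | none => n - 1 | some i => i
  let st := pvCollectB data (PySem.List.pyRange start_index stop 1) ([], [])
  (st.1, st.2, match marker with | none => -1 | some i => i)

-- ===== PRECONDITION & SPEC =====
-- Pre_ excludes exactly the inputs where A raises IndexError: a nonempty scan range starting below -len(data)
def Pre_extract_qna (data : List String) (start_index : Int) : Prop :=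
  (data.length : Int) - 1 ≤ start_index ∨ -(data.length : Int) ≤ start_index
instance (data : List String) (start_index : Int) : Decidable (Pre_extract_qna data start_index) := by unfold Pre_extract_qna; infer_instance
def pvWitness_extract_qna : List String × Int := (["intro: 1", "- - q1", "ans1", "categories:"], 0)

def Spec_extract_qna (data : List String) (start_index : Int) (out : List String × List String × Int) : Prop := out = extract_qna_alt data start_index
instance (data : List String) (start_index : Int) (out : List String × List String × Int) : Decidable (Spec_extract_qna data start_index out) := by unfold Spec_extract_qna; infer_instance

-- ===== CLAIM (what is proved, stated in full; the proofs are below) =====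
def Claim_equal_extract_qna : Prop := ∀ (data : List String) (start_index : Int), Dom_extract_qna data start_index → Pre_extract_qna data start_index → Spec_extract_qna data start_index (extract_qna data start_index)

-- ===== LEMMAS AND PROOFS =====

lemma pvFindMarkerB_mem (data : List String) (l : List Int) (i : Int)
    (h : pvFindMarkerB data l = some i) : i ∈ l := by
  induction l with
  | nil => simp [pvFindMarkerB] at h
  | cons a rest ih =>
    simp only [pvFindMarkerB] at h
    split at h
    · simp at h; simp [h]
    · exact List.mem_cons_of_mem _ (ih h)

-- A's interleaved scan equals: find first marker, then collect over the truncated range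
lemma pvLoop_eq (data : List String) (b : Int) :
    ∀ (fuel : Nat) (a : Int), (b - a).toNat = fuel → ∀ (qs ans : List String),
      pvLoopA data (PySem.List.pyRange a b 1) qs ans =
        (match pvFindMarkerB data (PySem.List.pyRange a b 1) with
         | none =>
           let st := pvCollectB data (PySem.List.pyRange a b 1) (qs, ans)
           (st.1, st.2, -1)
         | some i =>
           let st := pvCollectB data (PySem.List.pyRange a i 1) (qs, ans)
           (st.1, st.2, i)) := by
  intro fuel
  induction fuel with
  | zero =>
    intro a ha qs ans
    have hba : b ≤ a := by omega
    simp [PySem.List.pyRange_one_eq_nil hba, pvLoopA, pvFindMarkerB, pvCollectB]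
  | succ n ih =>
    intro a ha qs ans
    have hab : a < b := by omega
    rw [PySem.List.pyRange_one_cons hab]
    by_cases hcat : PySem.Str.isIn "categories:" (pvLine data a) = true
    · simp only [pvLoopA, pvFindMarkerB, hcat, if_pos]
      simp [PySem.List.pyRange_one_eq_nil (le_refl a), pvCollectB]
    · have ih' := ih (a + 1) (by omega)
      by_cases hq : PySem.Str.isIn "- - " (pvLine data a) = true
      · have hq2 : PySem.Chars.isIn ['-', ' ', '-', ' '] (pvLine data a).toList = true := by
          simpa using hq
        simp only [pvLoopA, pvFindMarkerB, hcat, hq, if_pos, if_neg, Bool.false_eq_true,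
          not_false_eq_true]
        rw [ih' (qs ++ [pvLine data a]) (ans ++ [pvLine data (a + 1)])]
        cases hm : pvFindMarkerB data (PySem.List.pyRange (a + 1) b 1) with
        | none =>
          simp only
          simp [pvCollectB, hq2]
        | some i =>
          have hi : a + 1 ≤ i := by
            have := pvFindMarkerB_mem data _ _ hm
            exact (PySem.List.mem_pyRange_one.1 this).1
          simp only
          rw [PySem.List.pyRange_one_cons (show a < i by omega)]
          simp [pvCollectB, hq2]
      · have hq2 : PySem.Chars.isIn ['-', ' ', '-', ' '] (pvLine data a).toList = false := by
          simpa using hq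
        simp only [pvLoopA, pvFindMarkerB, hcat, hq, if_neg, Bool.false_eq_true,
          not_false_eq_true]
        rw [ih' qs ans]
        cases hm : pvFindMarkerB data (PySem.List.pyRange (a + 1) b 1) with
        | none =>
          simp only
          simp [pvCollectB, hq2]
        | some i =>
          have hi : a + 1 ≤ i := by
            have := pvFindMarkerB_mem data _ _ hm
            exact (PySem.List.mem_pyRange_one.1 this).1
          simp only
          rw [PySem.List.pyRange_one_cons (show a < i by omega)]
          simp [pvCollectB, hq2]

-- ===== VERDICT (by name: the statement is the Claim_ definition above) =====
theorem extract_qna_spec : Claim_equal_extract_qna := by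
  intro data start_index _ _
  unfold Spec_extract_qna extract_qna extract_qna_alt
  rw [pvLoop_eq data ((data.length : Int) - 1) ((((data.length : Int) - 1) - start_index).toNat)
    start_index rfl [] []]
  cases hm : pvFindMarkerB data (PySem.List.pyRange start_index ((data.length : Int) - 1) 1) <;>
    simp [hm]
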